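-- pv_equiv track=rewrite | github.com/omarzydan610/SignalFlowGraph-RouthStabilityCriterion | backend/routh_hurwitz.py | determine_stability
-- ===== SOURCE A (Python) =====
-- def determine_stability(matrix):
--     """Checks whether the system is stable after conducting the Routh Array"""
--     n = len(matrix)
--     sign_change = 0
--     pos = True
--     for i in range(0, n):
--         if matrix[i][0] > 0 and not pos:
--             pos = True
--             sign_change += 1
--         elif matrix[i][0] < 0 and pos:
--             pos = False
--             sign_change += 1
--     return sign_change
-- ===== SOURCE B (Python) =====
-- def determine_stability(matrix):
--     signs = [row[0] > 0 for row in matrix if row[0] != 0]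
--     return sum(1 for a, b in zip([True] + signs, signs) if a != b)
-- ===== Notes on version B (the rewrite author's own statement) =====
-- stated objective: alternative
-- what changed: Replaces A's single stateful loop (pos flag plus counter) by a projection/filter to a list of signs followed by a separate pairwise zip pass against a prepended True sentinel.
import Mathlib
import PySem

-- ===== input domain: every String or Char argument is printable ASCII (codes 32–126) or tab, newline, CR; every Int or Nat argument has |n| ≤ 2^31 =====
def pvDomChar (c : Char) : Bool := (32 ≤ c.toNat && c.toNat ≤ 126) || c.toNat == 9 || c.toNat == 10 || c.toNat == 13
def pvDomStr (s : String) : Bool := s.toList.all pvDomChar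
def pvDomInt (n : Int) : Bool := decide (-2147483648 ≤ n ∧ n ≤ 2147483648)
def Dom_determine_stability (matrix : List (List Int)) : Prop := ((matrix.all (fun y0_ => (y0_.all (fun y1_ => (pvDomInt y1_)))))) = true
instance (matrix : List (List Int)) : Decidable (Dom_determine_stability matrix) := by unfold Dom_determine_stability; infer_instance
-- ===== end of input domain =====

-- B replaces A's single stateful loop (pos flag + counter) by a sign projection and a
-- separate pairwise pass against a prepended True sentinel (alternative decomposition, same cost).


-- ===== PORT A =====
-- A iterates i over range(len(matrix)); matrix[i] is always in range, so the loop is the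
-- structural fold over the rows; row[0] (which raises IndexError on an empty row — excluded
-- by Pre_) is PySem.List.pyGet? row 0, defaulted (the default is never used under Pre_).
-- the body of A's loop, on the leading value v and the (pos, sign_change) state
def stepA (st : Bool × Int) (v : Int) : Bool × Int :=
  if v > 0 ∧ ¬ st.1 = true then (true, st.2 + 1)
  else if v < 0 ∧ st.1 = true then (false, st.2 + 1)
  else st

def determine_stability (matrix : List (List Int)) : Int :=
  (matrix.foldl (fun st row => stepA st ((PySem.List.pyGet? row 0).getD 0)) (true, 0)).2

-- ===== PORT B =====
def determine_stability_alt (matrix : List (List Int)) : Int :=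
  let signs := (matrix.filter (fun row => (PySem.List.pyGet? row 0).getD 0 ≠ 0)).map
      (fun row => decide ((PySem.List.pyGet? row 0).getD 0 > 0))
  (((List.zip (true :: signs) signs).filter (fun p => p.1 ≠ p.2)).length : Int)

-- ===== PRECONDITION & SPEC =====
-- Pre_ excludes matrices containing an empty row: there both A and B raise IndexError on row[0].
def Pre_determine_stability (matrix : List (List Int)) : Prop := ∀ row ∈ matrix, row ≠ []
instance (matrix : List (List Int)) : Decidable (Pre_determine_stability matrix) := by unfold Pre_determine_stability; infer_instance
def pvWitness_determine_stability : List (List Int) := [[1, 2], [-2], [3]]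

def Spec_determine_stability (matrix : List (List Int)) (out : Int) : Prop := out = determine_stability_alt matrix
instance (matrix : List (List Int)) (out : Int) : Decidable (Spec_determine_stability matrix out) := by unfold Spec_determine_stability; infer_instance

-- ===== CLAIM (what is proved, stated in full; the proofs are below) =====
def Claim_equal_determine_stability : Prop := ∀ (matrix : List (List Int)), Dom_determine_stability matrix → Pre_determine_stability matrix → Spec_determine_stability matrix (determine_stability matrix)

-- ===== LEMMAS AND PROOFS =====

-- count of sign transitions in `signs` read against the previous sign `b`
def pvCnt (b : Bool) (signs : List Bool) : Nat :=
  ((List.zip (b :: signs) signs).filter (fun p => p.1 ≠ p.2)).length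

theorem pvCnt_cons (b s : Bool) (rest : List Bool) :
    pvCnt b (s :: rest) = (if b ≠ s then 1 else 0) + pvCnt s rest := by
  simp [pvCnt, List.zip, List.filter]
  by_cases h : b = s <;> simp [h] <;> omega

-- A's fold over a column equals the starting count plus the transition count of B's signs
theorem pv_fold_eq (col : List Int) (b : Bool) (c : Int) :
    (col.foldl stepA (b, c)).2
      = c + (pvCnt b ((col.filter (fun v => decide (v ≠ 0))).map (fun v => decide (v > 0))) : Int) := by
  induction col generalizing b c with
  | nil => simp [pvCnt]
  | cons v rest ih =>
    rw [List.foldl_cons]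
    rcases lt_trichotomy v 0 with hv | hv | hv
    · have h1 : stepA (b, c) v = (false, if b then c + 1 else c) := by
        cases b <;> simp [stepA, hv, not_lt.mpr hv.le]
      have h2 : (v :: rest).filter (fun x => decide (x ≠ 0))
          = v :: rest.filter (fun x => decide (x ≠ 0)) := by simp [hv.ne]
      have h3 : decide (v > 0) = false := by simp [not_lt.mpr hv.le]
      rw [h1, h2, List.map_cons, h3, ih, pvCnt_cons]
      cases b <;> simp <;> push_cast <;> omega
    · have h1 : stepA (b, c) v = (b, c) := by
        cases b <;> simp [stepA, hv]
      have h2 : (v :: rest).filter (fun x => decide (x ≠ 0))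
          = rest.filter (fun x => decide (x ≠ 0)) := by simp [hv]
      rw [h1, h2, ih]
    · have h1 : stepA (b, c) v = (true, if b then c else c + 1) := by
        cases b <;> simp [stepA, hv, not_lt.mpr hv.le]
      have h2 : (v :: rest).filter (fun x => decide (x ≠ 0))
          = v :: rest.filter (fun x => decide (x ≠ 0)) := by simp [hv.ne']
      have h3 : decide (v > 0) = true := by simp [hv]
      rw [h1, h2, List.map_cons, h3, ih, pvCnt_cons]
      cases b <;> simp <;> push_cast <;> omega

-- B's filter-then-map over rows equals filter-then-map over the projected first column
theorem pv_filter_map_comm (matrix : List (List Int)) :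
    ((matrix.filter (fun row => (PySem.List.pyGet? row 0).getD 0 ≠ 0)).map
        (fun row => decide ((PySem.List.pyGet? row 0).getD 0 > 0)))
      = ((matrix.map (fun row => (PySem.List.pyGet? row 0).getD 0)).filter
            (fun v => decide (v ≠ 0))).map (fun v => decide (v > 0)) := by
  rw [List.filter_map, List.map_map]
  rfl

-- ===== VERDICT (by name: the statement is the Claim_ definition above) =====
theorem determine_stability_spec : Claim_equal_determine_stability := by
  intro matrix _ _
  unfold Spec_determine_stability determine_stability determine_stability_alt
  rw [← List.foldl_map, pv_fold_eq, pv_filter_map_comm]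
  simp [pvCnt]
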